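-- pv_equiv track=rewrite | github.com/atypon/S2AND | s2and/extentions/utils.py | get_block_dict
-- ===== SOURCE A (Python) =====
-- from typing import List, Dict
--
-- def get_block_dict(signatures: Dict[str, dict]) -> Dict[str, List[str]]:
--     """
--     Given dict of signatures, return the dict of blocks containing
--     block name : list of siagnatures in this block
--     """
--     block_dict = {}
--     for item in signatures.values():
--         if item['block'] not in block_dict:
--             block_dict[item['block']] = [item['signature_id']]
--         else:
--             block_dict[item['block']].append(item['signature_id'])
--     return block_dict
-- ===== SOURCE B (Python) =====
-- def get_block_dict(signatures):
--     """
--     Given dict of signatures, return the dict of blocks containing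
--     block name : list of siagnatures in this block
--     """
--     values = list(signatures.values())
--     blocks = list(dict.fromkeys(v['block'] for v in values))
--     return {b: [v['signature_id'] for v in values if v['block'] == b]
--             for b in blocks}
-- ===== Notes on version B (the rewrite author's own statement) =====
-- stated objective: alternative
-- what changed: Replaces the single incremental hash-grouping pass (insert-or-append into a growing dict) with a two-phase decomposition: first dedup the block names in first-occurrence order, then build each block's list by a per-block comprehension scan over the values.
import Mathlib
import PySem

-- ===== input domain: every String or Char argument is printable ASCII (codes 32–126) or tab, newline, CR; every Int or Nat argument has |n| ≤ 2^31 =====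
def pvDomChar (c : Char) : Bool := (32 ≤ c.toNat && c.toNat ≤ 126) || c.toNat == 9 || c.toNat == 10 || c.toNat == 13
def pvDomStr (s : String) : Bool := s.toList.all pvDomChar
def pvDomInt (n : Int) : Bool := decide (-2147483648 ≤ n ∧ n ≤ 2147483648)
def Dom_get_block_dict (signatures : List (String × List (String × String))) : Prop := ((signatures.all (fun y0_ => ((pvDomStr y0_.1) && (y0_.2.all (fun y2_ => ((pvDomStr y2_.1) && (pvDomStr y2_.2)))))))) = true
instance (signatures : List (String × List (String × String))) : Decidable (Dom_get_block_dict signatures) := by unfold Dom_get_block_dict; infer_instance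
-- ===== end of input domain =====

-- B replaces A's single insert-or-append hash-grouping pass by deduping the block names
-- first and then collecting each block's signature ids with one scan per block; same result,
-- no speed claim.

-- item['block'] / item['signature_id'] (inner dicts arrive as assoc lists; Dict.ofList models
-- Python's duplicate-key collapse; the .getD "" default is never reached inside Pre_).
def pvBlk (item : List (String × String)) : String :=
  ((PySem.Dict.ofList item).get? "block").getD ""
def pvSid (item : List (String × String)) : String :=
  ((PySem.Dict.ofList item).get? "signature_id").getD ""

-- ===== PORT A =====
def get_block_dict (signatures : List (String × List (String × String))) : List (String × List String) :=
  ((PySem.Dict.ofList signatures).values.foldl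
    (fun block_dict item =>
      if block_dict.contains (pvBlk item) = false then
        block_dict.insert (pvBlk item) [pvSid item]
      else
        block_dict.modify (pvBlk item) [] (fun l => l ++ [pvSid item]))
    PySem.Dict.empty).items

-- ===== PORT B =====
def get_block_dict_alt (signatures : List (String × List (String × String))) : List (String × List String) :=
  let values := (PySem.Dict.ofList signatures).values
  let blocks := PySem.List.dedup (values.map pvBlk)
  blocks.map (fun b => (b, (values.filter (fun v => pvBlk v == b)).map pvSid))

-- ===== PRECONDITION & SPEC =====
-- Pre_ excludes exactly the inputs where some signature record lacks the 'block' or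
-- 'signature_id' key, on which the Python A raises KeyError.
def Pre_get_block_dict (signatures : List (String × List (String × String))) : Prop :=
  ∀ item ∈ (PySem.Dict.ofList signatures).values,
    (PySem.Dict.ofList item).contains "block" = true ∧
    (PySem.Dict.ofList item).contains "signature_id" = true
instance (signatures : List (String × List (String × String))) : Decidable (Pre_get_block_dict signatures) := by unfold Pre_get_block_dict; infer_instance

def pvWitness_get_block_dict : (List (String × List (String × String))) :=
  [("s1", [("block", "a"), ("signature_id", "s1")]),
   ("s2", [("block", "a"), ("signature_id", "s2")]),
   ("s3", [("block", "b"), ("signature_id", "s3")])]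

def Spec_get_block_dict (signatures : List (String × List (String × String))) (out : List (String × List String)) : Prop := out = get_block_dict_alt signatures
instance (signatures : List (String × List (String × String))) (out : List (String × List String)) : Decidable (Spec_get_block_dict signatures out) := by unfold Spec_get_block_dict; infer_instance

-- ===== CLAIM (what is proved, stated in full; the proofs are below) =====
def Claim_equal_get_block_dict : Prop := ∀ (signatures : List (String × List (String × String))), Dom_get_block_dict signatures → Pre_get_block_dict signatures → Spec_get_block_dict signatures (get_block_dict signatures)

-- ===== LEMMAS AND PROOFS =====

-- A's insert-or-append step is exactly 'd[b] = d.get(b, []) + [s]'.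
lemma pv_step_eq (bd : PySem.Dict String (List String)) (item : List (String × String)) :
    (if bd.contains (pvBlk item) = false then
        bd.insert (pvBlk item) [pvSid item]
      else
        bd.modify (pvBlk item) [] (fun l => l ++ [pvSid item]))
    = bd.modify (pvBlk item) [] (fun l => l ++ [pvSid item]) := by
  split_ifs with h
  · simp [PySem.Dict.modify, PySem.Dict.insert, h, PySem.Dict.getD_of_not_contains bd ([] : List String) h]
  · rfl

-- A's grouping loop, characterised: its items are the deduped block names paired with
-- each block's filtered signature ids.
lemma pv_fold_items (l : List (List (String × String))) :
    ((l.foldl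
        (fun bd v => bd.modify (pvBlk v) [] (fun acc => acc ++ [pvSid v]))
        (PySem.Dict.empty : PySem.Dict String (List String))).items)
    = (PySem.List.dedup (l.map pvBlk)).map
        (fun b => (b, (l.filter (fun v => pvBlk v == b)).map pvSid)) := by
  have hfold : (l.foldl
        (fun bd v => bd.modify (pvBlk v) [] (fun acc => acc ++ [pvSid v]))
        (PySem.Dict.empty : PySem.Dict String (List String)))
      = ((l.map (fun v => (pvBlk v, pvSid v))).foldl
          (fun bd p => bd.modify p.1 [] (fun acc => acc ++ [p.2]))
          (PySem.Dict.empty : PySem.Dict String (List String))) := by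
    rw [List.foldl_map]
  have hkeys : (l.foldl
        (fun bd v => bd.modify (pvBlk v) [] (fun acc => acc ++ [pvSid v]))
        (PySem.Dict.empty : PySem.Dict String (List String))).keys
      = PySem.List.dedup (l.map pvBlk) := by
    rw [PySem.Dict.keys_foldl_modify_key]
    simp only [PySem.List.dedup_eq_ofList, PySem.Dict.keys_empty]
    rfl
  have hnodup : (l.foldl
        (fun bd v => bd.modify (pvBlk v) [] (fun acc => acc ++ [pvSid v]))
        (PySem.Dict.empty : PySem.Dict String (List String))).keys.Nodup := by
    rw [hkeys]; exact PySem.List.nodup_dedup _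
  have hget : ∀ b : String, (l.foldl
        (fun bd v => bd.modify (pvBlk v) [] (fun acc => acc ++ [pvSid v]))
        (PySem.Dict.empty : PySem.Dict String (List String))).getD b []
      = (l.filter (fun v => pvBlk v == b)).map pvSid := by
    intro b
    rw [hfold, PySem.Dict.getD_foldl_modify_append, PySem.Dict.getD_empty]
    simp [List.filter_map, Function.comp_def]
  rw [PySem.Dict.items_eq_map_keys _ hnodup ([] : List String), hkeys]
  exact List.map_congr_left (fun b _ => by rw [hget b])

-- ===== VERDICT (by name: the statement is the Claim_ definition above) =====
theorem get_block_dict_spec : Claim_equal_get_block_dict := by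
  intro signatures _ _
  show get_block_dict signatures = get_block_dict_alt signatures
  unfold get_block_dict
  have hstep : (fun (block_dict : PySem.Dict String (List String)) item =>
      if block_dict.contains (pvBlk item) = false then
        block_dict.insert (pvBlk item) [pvSid item]
      else
        block_dict.modify (pvBlk item) [] (fun l => l ++ [pvSid item]))
    = (fun bd v => bd.modify (pvBlk v) [] (fun acc => acc ++ [pvSid v])) :=
    funext fun bd => funext fun item => pv_step_eq bd item
  rw [hstep]
  exact pv_fold_items _
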